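-- pv_equiv track=rewrite | github.com/Borislav-source/Python-Fundamentals | Exam preparations/Exam/3. Angry Pet.py | calculations
-- ===== SOURCE A (Python) =====
-- def check(price_type, price):
--     the_sum = 0
--     if price_type == 'positive':
--         if price > 0:
--             the_sum += price
--     elif price_type == 'negative':
--         if price < 0:
--             the_sum += price
--     elif price_type == 'all':
--         the_sum += price
--     return the_sum
--
-- def calculations(new_list, entry_price, type_of_items, price_type):
--     the_sum = 0
--     for price in new_list:
--         if type_of_items == 'cheap':
--             if entry_price > price:
--                 the_sum = check(price_type, price)
--         elif type_of_items == 'expensive':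
--             if entry_price <= price:
--                 the_sum = check(price_type, price)
--     return the_sum
-- ===== SOURCE B (Python) =====
-- def check(price_type, price):
--     the_sum = 0
--     if price_type == 'positive':
--         if price > 0:
--             the_sum += price
--     elif price_type == 'negative':
--         if price < 0:
--             the_sum += price
--     elif price_type == 'all':
--         the_sum += price
--     return the_sum
--
-- def calculations(new_list, entry_price, type_of_items, price_type):
--     for price in reversed(new_list):
--         if type_of_items == 'cheap':
--             if entry_price > price:
--                 return check(price_type, price)
--         elif type_of_items == 'expensive':
--             if entry_price <= price:
--                 return check(price_type, price)
--     return 0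
-- ===== Notes on version B (the rewrite author's own statement) =====
-- stated objective: alternative
-- what changed: Replaces A's forward pass that overwrites an accumulator on every type-matching element with a backward scan over reversed(new_list) that returns check(...) at the first match (the last matching element) and 0 if none, so the loop exits early instead of always traversing the whole list.
import Mathlib
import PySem

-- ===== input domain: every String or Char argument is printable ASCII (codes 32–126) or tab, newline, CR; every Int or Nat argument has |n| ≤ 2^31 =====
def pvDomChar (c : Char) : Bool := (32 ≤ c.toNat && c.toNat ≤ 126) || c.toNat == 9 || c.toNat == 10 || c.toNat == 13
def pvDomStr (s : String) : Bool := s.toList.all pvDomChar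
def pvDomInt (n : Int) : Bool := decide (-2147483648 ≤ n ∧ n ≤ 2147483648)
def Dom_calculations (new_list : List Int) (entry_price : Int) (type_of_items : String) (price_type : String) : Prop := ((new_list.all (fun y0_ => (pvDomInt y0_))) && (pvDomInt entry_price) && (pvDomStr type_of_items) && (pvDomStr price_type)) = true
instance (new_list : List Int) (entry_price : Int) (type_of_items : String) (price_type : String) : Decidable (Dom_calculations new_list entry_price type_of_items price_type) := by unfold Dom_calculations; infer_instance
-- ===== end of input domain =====

-- B scans reversed(new_list) and returns on the first type-matching price (early exit) instead of A's forward accumulator overwrite; same return value, no side effects.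
-- ===== PORT A =====
-- shared helper `check` (identical in Source A and Source B)
def check (price_type : String) (price : Int) : Int :=
  let the_sum : Int := 0
  if price_type == "positive" then
    (if price > 0 then the_sum + price else the_sum)
  else if price_type == "negative" then
    (if price < 0 then the_sum + price else the_sum)
  else if price_type == "all" then the_sum + price
  else the_sum

def calculations (new_list : List Int) (entry_price : Int) (type_of_items : String) (price_type : String) : Int :=
  new_list.foldl (fun the_sum price =>
    if type_of_items == "cheap" then
      (if entry_price > price then check price_type price else the_sum)
    else if type_of_items == "expensive" then
      (if entry_price ≤ price then check price_type price else the_sum)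
    else the_sum) 0

-- ===== PORT B =====
-- the reversed-loop body: return check(...) on first match, else keep scanning; 0 after the loop
def calcAltGo (entry_price : Int) (type_of_items : String) (price_type : String) : List Int → Int
  | [] => 0
  | price :: rest =>
    if type_of_items == "cheap" then
      (if entry_price > price then check price_type price
       else calcAltGo entry_price type_of_items price_type rest)
    else if type_of_items == "expensive" then
      (if entry_price ≤ price then check price_type price
       else calcAltGo entry_price type_of_items price_type rest)
    else calcAltGo entry_price type_of_items price_type rest

def calculations_alt (new_list : List Int) (entry_price : Int) (type_of_items : String) (price_type : String) : Int :=
  calcAltGo entry_price type_of_items price_type new_list.reverse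

-- ===== PRECONDITION & SPEC =====
def Spec_calculations (new_list : List Int) (entry_price : Int) (type_of_items : String) (price_type : String) (out : Int) : Prop := out = calculations_alt new_list entry_price type_of_items price_type
instance (new_list : List Int) (entry_price : Int) (type_of_items : String) (price_type : String) (out : Int) : Decidable (Spec_calculations new_list entry_price type_of_items price_type out) := by unfold Spec_calculations; infer_instance

-- ===== CLAIM (what is proved, stated in full; the proofs are below) =====
def Claim_equal_calculations : Prop := ∀ (new_list : List Int) (entry_price : Int) (type_of_items : String) (price_type : String), Dom_calculations new_list entry_price type_of_items price_type → Spec_calculations new_list entry_price type_of_items price_type (calculations new_list entry_price type_of_items price_type)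

-- ===== LEMMAS AND PROOFS =====

-- ===== VERDICT (by name: the statement is the Claim_ definition above) =====
-- backward scan with an explicit fallback value (what the scan returns if no element matches)
def scanFb (entry_price : Int) (type_of_items : String) (price_type : String) (fb : Int) : List Int → Int
  | [] => fb
  | price :: rest =>
    if type_of_items == "cheap" then
      (if entry_price > price then check price_type price
       else scanFb entry_price type_of_items price_type fb rest)
    else if type_of_items == "expensive" then
      (if entry_price ≤ price then check price_type price
       else scanFb entry_price type_of_items price_type fb rest)
    else scanFb entry_price type_of_items price_type fb rest

theorem scanFb_append (ep : Int) (t p : String) (fb : Int) (a b : List Int) :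
    scanFb ep t p fb (a ++ b) = scanFb ep t p (scanFb ep t p fb b) a := by
  induction a with
  | nil => rfl
  | cons x xs ih => simp [scanFb, ih]

theorem go_eq_scanFb (ep : Int) (t p : String) (l : List Int) :
    calcAltGo ep t p l = scanFb ep t p 0 l := by
  induction l with
  | nil => rfl
  | cons x xs ih => simp [calcAltGo, scanFb, ih]

theorem foldl_eq_scan_rev (ep : Int) (t p : String) (l : List Int) (s : Int) :
    l.foldl (fun the_sum price =>
      if t == "cheap" then
        (if ep > price then check p price else the_sum)
      else if t == "expensive" then
        (if ep ≤ price then check p price else the_sum)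
      else the_sum) s = scanFb ep t p s l.reverse := by
  induction l generalizing s with
  | nil => rfl
  | cons x xs ih =>
    simp only [List.foldl_cons, List.reverse_cons, scanFb_append, ih]
    simp [scanFb]

-- ===== VERDICT (by name: the statement is the Claim_ definition above) =====
theorem calculations_spec : Claim_equal_calculations := by
  intro nl ep t p _
  unfold Spec_calculations calculations calculations_alt
  rw [foldl_eq_scan_rev, go_eq_scanFb]
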